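-- pv_equiv track=rewrite | github.com/Froodooo/aoc20 | day20/day_20.py | _find_edge_tiles
-- ===== SOURCE A (Python) =====
-- def _find_edge_tiles(tiles):
--     tile_neighbours = {}
--     for tile_id, tile in tiles.items():
--         borders = _get_tile_borders(tile)
--         edges = []
--         for other_tile_id, other_tile in tiles.items():
--             if tile_id == other_tile_id:
--                 continue
--             other_borders = _get_tile_borders(other_tile)
--             touching_edges = 0
--             for rotation in range(0, 4):
--                 rotated_other_borders = _rotate_borders(
--                     other_borders, rotation)
--                 for flip in ['horizontal', 'vertical', 'none']:
--                     flipped_other_borders = _flip_borders(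
--                         rotated_other_borders, flip)
--                     intersection = [
--                         (other_tile_id) for border in borders if border in flipped_other_borders]
--                     touching_edges += len(intersection)
--             if touching_edges > 0:
--                 edges.append(other_tile_id)
--         tile_neighbours[tile_id] = edges
--
--     return tile_neighbours
--
-- def _rotate_borders(borders, times):
--     if times == 0:
--         return borders
--     return borders[-times:] + borders[:-times]
--
-- def _flip_borders(borders, orientation):
--     [top, right, bottom, left] = borders
--     if orientation == 'horizontal':
--         return [top[::-1], left, bottom[::-1], right]
--     elif orientation == 'vertical':
--         return [bottom, right[::-1], top, left[::-1]]
--     else: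
--         return borders
--
-- def _get_tile_borders(tile):
--     top = ''.join([pixel for pixel in tile[0]])
--     bottom = ''.join([pixel for pixel in tile[len(tile) - 1]])
--     left = ''.join([tile[row][0] for row in range(len(tile))])
--     right = ''.join([tile[row][len(tile) - 1] for row in range(len(tile))])
--
--     return [top, right, bottom, left]
-- ===== SOURCE B (Python) =====
-- def _find_edge_tiles(tiles):
--     # Canonicalise each border (min of the string and its reverse) once per tile,
--     # then two tiles are neighbours iff their canonical-border sets intersect.
--     def canon_borders(tile):
--         h = len(tile)
--         top = tile[0]
--         bottom = tile[h - 1]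
--         left = ''.join(row[0] for row in tile)
--         right = ''.join(row[h - 1] for row in tile)
--         return {min(b, b[::-1]) for b in (top, right, bottom, left)}
--
--     canon = [(tid, canon_borders(tile)) for tid, tile in tiles.items()]
--     return {tid: [oid for oid, oset in canon if oid != tid and cset & oset]
--             for tid, cset in canon}
-- ===== Notes on version B (the rewrite author's own statement) =====
-- stated objective: faster
-- what changed: Instead of testing, for every ordered pair of tiles, all 12 rotations/flips of the other tile's border list against each border, B computes each tile's set of canonical borders (min of the border string and its reverse) once per tile and marks two tiles as neighbours iff those small sets intersect.
import Mathlib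
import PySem

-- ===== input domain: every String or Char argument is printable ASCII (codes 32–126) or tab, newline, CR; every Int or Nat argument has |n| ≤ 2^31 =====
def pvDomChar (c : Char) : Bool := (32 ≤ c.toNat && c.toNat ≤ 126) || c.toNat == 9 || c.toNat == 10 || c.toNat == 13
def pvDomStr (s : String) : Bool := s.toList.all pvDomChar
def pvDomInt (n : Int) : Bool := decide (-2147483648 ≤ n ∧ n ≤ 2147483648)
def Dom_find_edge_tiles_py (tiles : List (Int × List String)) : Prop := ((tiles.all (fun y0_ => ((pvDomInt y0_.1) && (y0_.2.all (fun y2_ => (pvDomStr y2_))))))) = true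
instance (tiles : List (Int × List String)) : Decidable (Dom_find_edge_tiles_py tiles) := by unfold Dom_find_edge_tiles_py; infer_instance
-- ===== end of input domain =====

-- B replaces A's per-pair enumeration of the 12 rotated/flipped border lists by canonical borders
-- (min of each border string and its reverse) computed once per tile and compared by set
-- intersection (objective: faster, by a constant factor).

-- ===== PORT A =====
-- s[::-1] (cf. PySem.Str.slice?_none_none_neg_one: the reverse slice IS String.ofList s.toList.reverse)
def pyRevStr (s : String) : String := String.ofList s.toList.reverse

-- _get_tile_borders, field by field; ''.join over a string's characters rebuilds that string,
-- ported as String.ofList of its character list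
def topA (tile : List String) : String := String.ofList (PySem.List.pyGetD tile 0 "").toList
def bottomA (tile : List String) : String :=
  String.ofList (PySem.List.pyGetD tile ((tile.length : Int) - 1) "").toList
def leftA (tile : List String) : String :=
  String.ofList ((PySem.List.pyRange 0 (tile.length : Int) 1).map
    (fun r => (PySem.Str.pyGet? (PySem.List.pyGetD tile r "") 0).getD ' '))
def rightA (tile : List String) : String :=
  String.ofList ((PySem.List.pyRange 0 (tile.length : Int) 1).map
    (fun r => (PySem.Str.pyGet? (PySem.List.pyGetD tile r "") ((tile.length : Int) - 1)).getD ' '))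
def getTileBorders (tile : List String) : List String :=
  [topA tile, rightA tile, bottomA tile, leftA tile]

-- _rotate_borders
def rotateBorders (borders : List String) (times : Int) : List String :=
  if times = 0 then borders
  else PySem.List.slice borders (some (-times)) none ++ PySem.List.slice borders none (some (-times))

-- _flip_borders; the [a,b,c,d] unpacking only ever sees 4-lists (getTileBorders), _ is unreachable
def flipBorders (borders : List String) (orientation : String) : List String :=
  match borders with
  | [top, right, bottom, left] =>
    if orientation = "horizontal" then [pyRevStr top, left, pyRevStr bottom, right]
    else if orientation = "vertical" then [bottom, pyRevStr right, top, pyRevStr left]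
    else borders
  | _ => borders

-- the touching_edges accumulation of A's two inner loops (the intersection list is kept as built)
def touchingEdges (borders otherBorders : List String) (otherId : Int) : Int :=
  (PySem.List.pyRange 0 4 1).foldl (fun t rotation =>
    let rotated := rotateBorders otherBorders rotation
    ["horizontal", "vertical", "none"].foldl (fun t flip =>
      let flipped := flipBorders rotated flip
      t + (((borders.filter (fun b => flipped.contains b)).map (fun _ => otherId)).length : Int)) t) 0

def find_edge_tiles_py (tiles : List (Int × List String)) : List (Int × List Int) :=
  let items := (PySem.Dict.ofList tiles).items
  items.foldl (fun acc p =>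
    let borders := getTileBorders p.2
    let edges := items.foldl (fun edges q =>
      if p.1 == q.1 then edges
      else if touchingEdges borders (getTileBorders q.2) q.1 > 0 then edges ++ [q.1] else edges)
      ([] : List Int)
    acc ++ [(p.1, edges)]) []

-- ===== PORT B =====
-- Python min(x, y) on str: y replaces x exactly when y < x
def pymin (x y : String) : String := if y < x then y else x
def canon1 (b : String) : String := pymin b (pyRevStr b)

def canonBorders (tile : List String) : PySem.Set String :=
  let h : Int := tile.length
  let top := PySem.List.pyGetD tile 0 ""
  let bottom := PySem.List.pyGetD tile (h - 1) ""
  let left := String.ofList (tile.map (fun row => (PySem.Str.pyGet? row 0).getD ' '))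
  let right := String.ofList (tile.map (fun row => (PySem.Str.pyGet? row (h - 1)).getD ' '))
  PySem.Set.ofList ([top, right, bottom, left].map canon1)

def find_edge_tiles_py_alt (tiles : List (Int × List String)) : List (Int × List Int) :=
  let canon := (PySem.Dict.ofList tiles).items.map (fun p => (p.1, canonBorders p.2))
  canon.map (fun p =>
    (p.1, (canon.filter (fun q => q.1 != p.1 && !(PySem.Set.inter p.2 q.2).isEmpty)).map (·.1)))

-- ===== PRECONDITION & SPEC =====
-- Pre_ excludes exactly the inputs where Python A raises IndexError: a tile with no rows,
-- or a row shorter than the tile's row count (A reads column len(tile)-1 of every row).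
def Pre_find_edge_tiles_py (tiles : List (Int × List String)) : Prop :=
  ∀ p ∈ (PySem.Dict.ofList tiles).items, p.2 ≠ [] ∧ ∀ row ∈ p.2, (p.2.length : Int) ≤ PySem.Str.len row
instance (tiles : List (Int × List String)) : Decidable (Pre_find_edge_tiles_py tiles) := by
  unfold Pre_find_edge_tiles_py; infer_instance
def pvWitness_find_edge_tiles_py : (List (Int × List String)) := [(1, ["ab", "cd"]), (2, ["bd", "xy"])]

def Spec_find_edge_tiles_py (tiles : List (Int × List String)) (out : List (Int × List Int)) : Prop := out = find_edge_tiles_py_alt tiles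
instance (tiles : List (Int × List String)) (out : List (Int × List Int)) : Decidable (Spec_find_edge_tiles_py tiles out) := by unfold Spec_find_edge_tiles_py; infer_instance

-- ===== CLAIM (what is proved, stated in full; the proofs are below) =====
def Claim_equal_find_edge_tiles_py : Prop := ∀ (tiles : List (Int × List String)), Dom_find_edge_tiles_py tiles → Pre_find_edge_tiles_py tiles → Spec_find_edge_tiles_py tiles (find_edge_tiles_py tiles)

-- ===== LEMMAS AND PROOFS =====
theorem revStr_involutive (s : String) : pyRevStr (pyRevStr s) = s := by
  simp [pyRevStr]
theorem canon1_eq_iff (x y : String) : canon1 x = canon1 y ↔ (x = y ∨ x = pyRevStr y) := by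
  constructor
  · intro h
    unfold canon1 pymin at h
    split_ifs at h with h1 h2 h2
    · left; have := congrArg pyRevStr h; rwa [revStr_involutive, revStr_involutive] at this
    · right; have := congrArg pyRevStr h; rwa [revStr_involutive] at this
    · right; exact h
    · left; exact h
  · rintro (rfl | rfl)
    · rfl
    · unfold canon1 pymin
      rw [revStr_involutive]
      by_cases h1 : pyRevStr y < y
      · rw [if_pos h1, if_neg (lt_asymm h1)]
      · rw [if_neg h1]
        by_cases h2 : y < pyRevStr y
        · rw [if_pos h2]
        · rw [if_neg h2]
          exact le_antisymm (not_lt.mp h2) (not_lt.mp h1)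
theorem cnt_pos (bs L : List String) (oid : Int) :
    0 < (((bs.filter (fun b => L.contains b)).map (fun _ => oid)).length : Int) ↔
      ∃ b ∈ bs, b ∈ L := by
  simp [List.length_pos_iff, List.filter_eq_nil_iff]

theorem touch_aux (bs : List String) (Ls : List (List String)) (oid : Int) (init : Int)
    (h0 : 0 ≤ init) :
    (0 < Ls.foldl (fun t L => t + (((bs.filter (fun b => L.contains b)).map (fun _ => oid)).length : Int)) init ↔
      0 < init ∨ ∃ b ∈ bs, ∃ L ∈ Ls, b ∈ L) := by
  induction Ls generalizing init with
  | nil => simp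
  | cons L Ls ih =>
    rw [List.foldl_cons]
    have hc0 : (0:Int) ≤ (((bs.filter (fun b => L.contains b)).map (fun _ => oid)).length : Int) :=
      Int.natCast_nonneg _
    rw [ih _ (by omega)]
    constructor
    · rintro (h | h)
      · rcases (by omega : 0 < init ∨ 0 < (((bs.filter (fun b => L.contains b)).map (fun _ => oid)).length : Int)) with h' | h'
        · exact Or.inl h'
        · obtain ⟨b, hb, hbL⟩ := (cnt_pos bs L oid).mp h'
          exact Or.inr ⟨b, hb, L, by simp, hbL⟩
      · obtain ⟨b, hb, L', hL', hbL⟩ := h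
        exact Or.inr ⟨b, hb, L', by simp [hL'], hbL⟩
    · rintro (h | ⟨b, hb, L', hL', hbL⟩)
      · exact Or.inl (by omega)
      · rcases List.mem_cons.mp hL' with rfl | hL'
        · have := (cnt_pos bs L' oid).mpr ⟨b, hb, hbL⟩; exact Or.inl (by omega)
        · exact Or.inr ⟨b, hb, L', hL', hbL⟩

theorem pr4 : PySem.List.pyRange 0 4 1 = [0, 1, 2, 3] := rfl
theorem rot0 (b1 b2 b3 b4 : String) : rotateBorders [b1,b2,b3,b4] 0 = [b1,b2,b3,b4] := rfl
theorem rot1 (b1 b2 b3 b4 : String) : rotateBorders [b1,b2,b3,b4] 1 = [b4,b1,b2,b3] := rfl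
theorem rot2 (b1 b2 b3 b4 : String) : rotateBorders [b1,b2,b3,b4] 2 = [b3,b4,b1,b2] := rfl
theorem rot3 (b1 b2 b3 b4 : String) : rotateBorders [b1,b2,b3,b4] 3 = [b2,b3,b4,b1] := rfl
theorem fH (b1 b2 b3 b4 : String) : flipBorders [b1,b2,b3,b4] "horizontal" = [pyRevStr b1, b4, pyRevStr b3, b2] := rfl
theorem fV (b1 b2 b3 b4 : String) : flipBorders [b1,b2,b3,b4] "vertical" = [b3, pyRevStr b2, b1, pyRevStr b4] := rfl
theorem fN (b1 b2 b3 b4 : String) : flipBorders [b1,b2,b3,b4] "none" = [b1,b2,b3,b4] := rfl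



set_option maxHeartbeats 1600000 in
theorem touching_unrolled (a1 a2 a3 a4 b1 b2 b3 b4 : String) (oid : Int) :
    touchingEdges [a1, a2, a3, a4] [b1, b2, b3, b4] oid =
      ([[pyRevStr b1, b4, pyRevStr b3, b2], [b3, pyRevStr b2, b1, pyRevStr b4], [b1, b2, b3, b4],
        [pyRevStr b4, b3, pyRevStr b2, b1], [b2, pyRevStr b1, b4, pyRevStr b3], [b4, b1, b2, b3],
        [pyRevStr b3, b2, pyRevStr b1, b4], [b1, pyRevStr b4, b3, pyRevStr b2], [b3, b4, b1, b2],
        [pyRevStr b2, b1, pyRevStr b4, b3], [b4, pyRevStr b3, b2, pyRevStr b1], [b2, b3, b4, b1]].foldl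
        (fun t L => t + ((([a1, a2, a3, a4].filter (fun b => L.contains b)).map (fun _ => oid)).length : Int)) 0) := by
    simp only [touchingEdges, pr4, List.foldl_cons, List.foldl_nil, rot0, rot1, rot2, rot3, fH, fV, fN]


set_option maxHeartbeats 1600000 in
theorem touching_pos_iff (a1 a2 a3 a4 b1 b2 b3 b4 : String) (oid : Int) :
    0 < touchingEdges [a1, a2, a3, a4] [b1, b2, b3, b4] oid ↔
      ∃ x ∈ [a1, a2, a3, a4], ∃ y ∈ [b1, b2, b3, b4], (x = y ∨ x = pyRevStr y) := by
  rw [touching_unrolled, touch_aux _ _ _ _ le_rfl]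
  simp only [lt_irrefl, false_or]
  refine exists_congr fun x => and_congr_right fun _ => ?_
  constructor
  · rintro ⟨L, hL, hxL⟩
    simp only [List.mem_cons, List.not_mem_nil, or_false] at hL
    rcases hL with rfl|rfl|rfl|rfl|rfl|rfl|rfl|rfl|rfl|rfl|rfl|rfl <;>
      (simp only [List.mem_cons, List.not_mem_nil, or_false] at hxL ;
       rcases hxL with rfl|rfl|rfl|rfl <;> simp)
  · rintro ⟨y, hy, h⟩
    simp only [List.mem_cons, List.not_mem_nil, or_false] at hy
    rcases h with rfl | rfl
    · exact ⟨[b1, b2, b3, b4], by simp,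
        by simp only [List.mem_cons, List.not_mem_nil, or_false]; exact hy⟩
    · rcases hy with h1 | h1 | h1 | h1
      · exact ⟨[pyRevStr b1, b4, pyRevStr b3, b2], by simp, by rw [h1]; simp⟩
      · exact ⟨[b3, pyRevStr b2, b1, pyRevStr b4], by simp, by rw [h1]; simp⟩
      · exact ⟨[pyRevStr b1, b4, pyRevStr b3, b2], by simp, by rw [h1]; simp⟩
      · exact ⟨[b3, pyRevStr b2, b1, pyRevStr b4], by simp, by rw [h1]; simp⟩
theorem col_eq (t : List String) (i : Int) :
    (PySem.List.pyRange 0 (t.length : Int) 1).map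
      (fun r => (PySem.Str.pyGet? (PySem.List.pyGetD t r "") i).getD ' ') =
    t.map (fun row => (PySem.Str.pyGet? row i).getD ' ') := by
  conv_rhs => rw [← PySem.List.map_pyGetD_pyRange_zero' t ""]
  rw [List.map_map]
  rfl

theorem canonBorders_eq (t : List String) :
    canonBorders t = PySem.Set.ofList ((getTileBorders t).map canon1) := by
  simp only [canonBorders, getTileBorders, topA, bottomA, leftA, rightA, String.ofList_toList,
    col_eq]

theorem inter_canon_iff (t u : List String) :
    (!(PySem.Set.inter (canonBorders t) (canonBorders u)).isEmpty) = true ↔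
      ∃ x ∈ getTileBorders t, ∃ y ∈ getTileBorders u, (x = y ∨ x = pyRevStr y) := by
  rw [canonBorders_eq, canonBorders_eq]
  rw [Bool.not_eq_eq_eq_not, Bool.not_true, List.isEmpty_eq_false_iff_exists_mem]
  constructor
  · rintro ⟨z, hz⟩
    rw [PySem.Set.mem_inter] at hz
    obtain ⟨hz1, hz2⟩ := hz
    rw [PySem.Set.mem_ofList, List.mem_map] at hz1 hz2
    obtain ⟨x, hx, hcx⟩ := hz1
    obtain ⟨y, hy, hcy⟩ := hz2
    exact ⟨x, hx, y, hy, (canon1_eq_iff x y).mp (hcx.trans hcy.symm)⟩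
  · rintro ⟨x, hx, y, hy, hxy⟩
    refine ⟨canon1 x, ?_⟩
    rw [PySem.Set.mem_inter, PySem.Set.mem_ofList, PySem.Set.mem_ofList]
    exact ⟨List.mem_map.mpr ⟨x, hx, rfl⟩,
      List.mem_map.mpr ⟨y, hy, ((canon1_eq_iff x y).mpr hxy).symm⟩⟩

theorem cond_eq (p q : Int × List String) :
    (if p.1 == q.1 then (false : Bool)
     else decide (touchingEdges (getTileBorders p.2) (getTileBorders q.2) q.1 > 0)) =
    (q.1 != p.1 && !(PySem.Set.inter (canonBorders p.2) (canonBorders q.2)).isEmpty) := by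
  by_cases hpq : p.1 = q.1
  · simp [hpq]
  · have h1 : (p.1 == q.1) = false := by simp [hpq]
    have h2 : (q.1 != p.1) = true := by simp [Ne.symm hpq]
    simp only [h1, h2, Bool.false_eq_true, if_false, Bool.true_and]
    have hiff : touchingEdges (getTileBorders p.2) (getTileBorders q.2) q.1 > 0 ↔
        (!(PySem.Set.inter (canonBorders p.2) (canonBorders q.2)).isEmpty) = true := by
      rw [inter_canon_iff]
      exact touching_pos_iff (topA p.2) (rightA p.2) (bottomA p.2) (leftA p.2)
        (topA q.2) (rightA q.2) (bottomA q.2) (leftA q.2) q.1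
    rcases Bool.eq_false_or_eq_true (!(PySem.Set.inter (canonBorders p.2) (canonBorders q.2)).isEmpty) with hb | hb
    · rw [hb, decide_eq_true_eq]
      exact hiff.mpr hb
    · rw [hb, decide_eq_false_iff_not, hiff, hb]
      simp

theorem main_eq (tiles : List (Int × List String)) :
    find_edge_tiles_py tiles = find_edge_tiles_py_alt tiles := by
  unfold find_edge_tiles_py find_edge_tiles_py_alt
  rw [PySem.List.foldl_append_singleton_eq_map]
  rw [List.map_map]
  refine List.map_congr_left fun p _ => ?_
  have hbody : (fun (edges : List Int) (q : Int × List String) =>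
      if p.1 == q.1 then edges
      else if touchingEdges (getTileBorders p.2) (getTileBorders q.2) q.1 > 0 then edges ++ [q.1] else edges) =
      (fun (edges : List Int) (q : Int × List String) =>
        if (q.1 != p.1 && !(PySem.Set.inter (canonBorders p.2) (canonBorders q.2)).isEmpty) then edges ++ [q.1] else edges) := by
    funext edges q
    rw [← cond_eq p q]
    by_cases hpq : p.1 = q.1
    · simp [hpq]
    · have h1 : (p.1 == q.1) = false := by simp [hpq]
      rw [h1]
      by_cases ht : touchingEdges (getTileBorders p.2) (getTileBorders q.2) q.1 > 0
      · simp [ht]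
      · simp [ht]
  rw [hbody, PySem.List.foldl_append_if]
  simp only [Function.comp_apply, List.nil_append]
  rw [List.filter_map, List.map_map]
  rfl

-- ===== VERDICT (by name: the statement is the Claim_ definition above) =====
theorem find_edge_tiles_py_spec : Claim_equal_find_edge_tiles_py := by
  intro tiles _ _
  unfold Spec_find_edge_tiles_py
  exact main_eq tiles
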